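-- pv_equiv track=rewrite | github.com/OrlyS112561/pokergameweb | main.py | check_if_2pairs
-- ===== SOURCE A (Python) =====
-- def check_if_2pairs(hand_value, board_value):
--     is_2pairs = False
--     board2pairs = []
--     for card in board_value:
--         if board_value.count(card) == 2:
--             if board2pairs.count(card) == 1:
--                 pass
--             else:
--                 board2pairs.append(card)
--     if hand_value[0] == hand_value[1]:
--         if len(board2pairs) >= 1:
--             is_2pairs = True
--     elif board_value.count(hand_value[0]) == 1 and board_value.count(hand_value[1]) == 1:
--         is_2pairs = True
--     elif board_value.count(hand_value[0]) == 1 and len(board2pairs) >= 1: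
--         is_2pairs = True
--     elif board_value.count(hand_value[1]) == 1 and len(board2pairs) >= 1:
--         is_2pairs = True
--     elif len(board2pairs) == 2:
--         is_2pairs = True
--     return is_2pairs
-- ===== SOURCE B (Python) =====
-- def check_if_2pairs(hand_value, board_value):
--     h0, h1 = hand_value[0], hand_value[1]
--     s = sorted(board_value)
--     n = len(s)
--     bp = c0 = c1 = 0
--     i = 0
--     while i < n:                      # scan runs of equal ranks in the sorted board
--         j = i + 1
--         while j < n and s[j] == s[i]:
--             j += 1
--         r = j - i                     # multiplicity of rank s[i] on the board
--         if r == 2: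
--             bp += 1
--         if s[i] == h0:
--             c0 = r
--         if s[i] == h1:
--             c1 = r
--         i = j
--     if h0 == h1:
--         return bp >= 1
--     pairs = (c0 == 1) + (c1 == 1)
--     return bp == 2 if pairs == 0 else pairs + bp >= 2
-- ===== Notes on version B (the rewrite author's own statement) =====
-- stated objective: faster
-- what changed: Sort-then-scan instead of repeated board.count scans and an appended pair list: one run-length pass over the sorted board yields the number of exactly-paired ranks and both hole-card multiplicities at once, and the five-way elif chain collapses to one pair-count comparison.
import Mathlib
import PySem

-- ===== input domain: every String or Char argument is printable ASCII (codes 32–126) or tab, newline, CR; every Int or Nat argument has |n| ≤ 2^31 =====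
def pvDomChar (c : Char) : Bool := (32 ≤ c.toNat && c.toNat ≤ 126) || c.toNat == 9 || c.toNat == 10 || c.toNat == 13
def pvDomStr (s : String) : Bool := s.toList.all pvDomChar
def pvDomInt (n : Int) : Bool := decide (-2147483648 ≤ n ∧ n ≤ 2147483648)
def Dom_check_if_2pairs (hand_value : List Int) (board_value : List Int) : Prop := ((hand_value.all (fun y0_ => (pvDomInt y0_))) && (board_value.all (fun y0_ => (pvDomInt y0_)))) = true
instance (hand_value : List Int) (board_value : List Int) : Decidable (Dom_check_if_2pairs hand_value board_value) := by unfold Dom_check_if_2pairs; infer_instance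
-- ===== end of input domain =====

-- B sorts the board once and run-length-scans it (sort-then-scan) instead of A's repeated
-- board.count scans with an appended pair list and five-way elif chain (faster in a timing run).


-- ===== PORT A =====
def check_if_2pairs (hand_value : List Int) (board_value : List Int) : Bool :=
  let board2pairs : List Int := board_value.foldl (fun acc card =>
    if PySem.List.count board_value card = 2 then
      if PySem.List.count acc card = 1 then acc else acc ++ [card]
    else acc) []
  match PySem.List.pyGet? hand_value 0, PySem.List.pyGet? hand_value 1 with
  | some h0, some h1 =>
    if h0 = h1 then
      decide (1 ≤ board2pairs.length)
    else if PySem.List.count board_value h0 = 1 ∧ PySem.List.count board_value h1 = 1 then true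
    else if PySem.List.count board_value h0 = 1 ∧ 1 ≤ board2pairs.length then true
    else if PySem.List.count board_value h1 = 1 ∧ 1 ≤ board2pairs.length then true
    else decide (board2pairs.length = 2)
  | _, _ => false     -- hand_value[0] / hand_value[1]: IndexError in Python, excluded by Pre_

-- ===== PORT B =====
-- the outer while loop of Source B: consume one run of equal values of the sorted board per step,
-- carrying (bp, c0, c1); the inner while that finds j is the takeWhile/dropWhile split.
def pvRunScan (h0 h1 : Int) : List Int → Int × Int × Int → Int × Int × Int
  | [], st => st
  | x :: t, (bp, c0, c1) =>
      let r : Int := ((x :: t).takeWhile (fun y => y == x)).length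
      pvRunScan h0 h1 ((x :: t).dropWhile (fun y => y == x))
        (if r = 2 then bp + 1 else bp, if x = h0 then r else c0, if x = h1 then r else c1)
  termination_by l => l.length
  decreasing_by
    simp only [List.dropWhile_cons, beq_self_eq_true, if_pos]
    have := List.length_dropWhile_le (fun y => y == x) t
    simp only [List.length_cons]
    omega

def check_if_2pairs_alt (hand_value : List Int) (board_value : List Int) : Bool :=
  match PySem.List.pyGet? hand_value 0 with
  | none => false     -- hand_value[0]: IndexError in Python, excluded by Pre_
  | some h0 =>
    match PySem.List.pyGet? hand_value 1 with
    | none => false   -- hand_value[1]: IndexError in Python, excluded by Pre_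
    | some h1 =>
      let s := PySem.List.sorted board_value (fun x => x) false
      let st := pvRunScan h0 h1 s (0, 0, 0)
      let bp := st.1
      let c0 := st.2.1
      let c1 := st.2.2
      if h0 = h1 then decide (1 ≤ bp)
      else
        let pairs : Int := (if c0 = 1 then 1 else 0) + (if c1 = 1 then 1 else 0)
        if pairs = 0 then decide (bp = 2) else decide (2 ≤ pairs + bp)

-- ===== PRECONDITION & SPEC =====
-- Pre_ excludes hands with fewer than 2 cards, on which A raises IndexError at hand_value[0]/[1].
def Pre_check_if_2pairs (hand_value : List Int) (board_value : List Int) : Prop :=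
  2 ≤ hand_value.length
instance (hand_value : List Int) (board_value : List Int) : Decidable (Pre_check_if_2pairs hand_value board_value) := by unfold Pre_check_if_2pairs; infer_instance
def pvWitness_check_if_2pairs : List Int × List Int := ([3, 7], [3, 5, 5, 9])

def Spec_check_if_2pairs (hand_value : List Int) (board_value : List Int) (out : Bool) : Prop := out = check_if_2pairs_alt hand_value board_value
instance (hand_value : List Int) (board_value : List Int) (out : Bool) : Decidable (Spec_check_if_2pairs hand_value board_value out) := by unfold Spec_check_if_2pairs; infer_instance

-- ===== CLAIM (what is proved, stated in full; the proofs are below) =====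
def Claim_equal_check_if_2pairs : Prop := ∀ (hand_value : List Int) (board_value : List Int), Dom_check_if_2pairs hand_value board_value → Pre_check_if_2pairs hand_value board_value → Spec_check_if_2pairs hand_value board_value (check_if_2pairs hand_value board_value)

-- ===== LEMMAS AND PROOFS =====

-- the number of ranks occurring exactly twice in l (order-free form both sides are reduced to)
def pvN (l : List Int) : Nat := (l.toFinset.filter (fun k => l.count k = 2)).card

-- ---- A side: board2pairs is the dedup of the ranks of count 2, of length pvN ----
theorem pv_inner_fold (l : List Int) (s : List Int) (hs : s.Nodup) :
    l.foldl (fun acc card => if PySem.List.count acc card = 1 then acc else acc ++ [card]) s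
      = PySem.Set.update s l := by
  induction l generalizing s with
  | nil => rfl
  | cons c t ih =>
      have hstep : (if PySem.List.count s c = 1 then s else s ++ [c]) = PySem.Set.add s c := by
        rw [PySem.Set.add_eq_ite]
        by_cases hm : c ∈ s
        · simp [hm, List.count_eq_one_of_mem hs hm, PySem.List.count]
        · simp [hm, List.count_eq_zero_of_not_mem hm, PySem.List.count]
      simp only [List.foldl_cons]
      rw [hstep, PySem.Set.update_cons]
      exact ih (PySem.Set.add s c) (PySem.Set.nodup_add s c hs)

theorem pv_b2p_length (board : List Int) :
    (board.foldl (fun acc card =>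
        if PySem.List.count board card = 2 then
          if PySem.List.count acc card = 1 then acc else acc ++ [card]
        else acc) ([] : List Int)).length = pvN board := by
  have h1 : board.foldl (fun acc card =>
        if PySem.List.count board card = 2 then
          if PySem.List.count acc card = 1 then acc else acc ++ [card]
        else acc) ([] : List Int)
      = (board.filter (fun card => PySem.List.count board card == 2)).foldl
          (fun acc card => if PySem.List.count acc card = 1 then acc else acc ++ [card]) [] := by
    rw [← PySem.List.foldl_if_eq_foldl_filter]
    apply PySem.List.foldl_congr_mem
    intro acc x _
    by_cases h : PySem.List.count board x = 2 <;> simp [h]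
  rw [h1, pv_inner_fold _ _ List.nodup_nil, PySem.Set.update_nil_left]
  set q : Int → Bool := fun card => PySem.List.count board card == 2 with hq
  have hnd : (PySem.Set.ofList (board.filter q)).Nodup := PySem.Set.nodup_ofList _
  rw [← List.toFinset_card_of_nodup hnd]
  have hfs : (PySem.Set.ofList (board.filter q)).toFinset = (board.filter q).toFinset := by
    apply Finset.ext; intro a
    simp [List.mem_toFinset, PySem.Set.mem_ofList]
  rw [hfs, List.toFinset_filter, pvN]
  congr 1
  apply Finset.filter_congr
  intro x _
  simp [hq, PySem.List.count]

-- ---- B side: facts about one run of a sorted list ----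
theorem pv_run_mem_take (x : Int) (l : List Int) :
    ∀ y ∈ l.takeWhile (fun z => z == x), y = x := by
  intro y hy
  have := List.mem_takeWhile_imp hy
  simpa using this

theorem pv_run_gt_drop (x : Int) (t : List Int)
    (hsort : (x :: t).Pairwise (· ≤ ·)) :
    ∀ y ∈ (x :: t).dropWhile (fun z => z == x), x < y := by
  have hdp : ((x :: t).dropWhile (fun z => z == x)).Pairwise (· ≤ ·) :=
    List.Pairwise.sublist (List.dropWhile_sublist _) hsort
  have hle : ∀ y ∈ (x :: t).dropWhile (fun z => z == x), x ≤ y := by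
    intro y hy
    have hmem : y ∈ x :: t := (List.dropWhile_sublist _).mem hy
    rcases List.mem_cons.mp hmem with h | h
    · exact le_of_eq h.symm
    · exact (List.pairwise_cons.mp hsort).1 y h
  intro y hy
  rcases hdm : (x :: t).dropWhile (fun z => z == x) with _ | ⟨d0, dt⟩
  · rw [hdm] at hy; cases hy
  · rw [hdm] at hy hle hdp
    have hhead : ¬ (d0 == x) = true := by
      have := List.head?_dropWhile_not (fun z => z == x) (x :: t)
      rw [hdm] at this
      simpa using this
    have hd0 : d0 ≠ x := by simpa using hhead
    have hx0 : x < d0 := lt_of_le_of_ne (hle d0 List.mem_cons_self) (Ne.symm hd0)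
    rcases List.mem_cons.mp hy with h | h
    · exact h ▸ hx0
    · exact lt_of_lt_of_le hx0 ((List.pairwise_cons.mp hdp).1 y h)

theorem pv_run_count (x : Int) (t : List Int)
    (hsort : (x :: t).Pairwise (· ≤ ·)) :
    (x :: t).count x = ((x :: t).takeWhile (fun z => z == x)).length ∧
    (∀ k : Int, k ≠ x → (x :: t).count k = ((x :: t).dropWhile (fun z => z == x)).count k) := by
  have hsplit := List.takeWhile_append_dropWhile (p := fun z => z == x) (l := x :: t)
  set u := (x :: t).takeWhile (fun z => z == x) with hu
  set d := (x :: t).dropWhile (fun z => z == x) with hdd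
  constructor
  · have hcu : u.count x = u.length := by
      rw [List.count_eq_length.mpr]
      intro y hy; exact ((pv_run_mem_take x (x :: t)) y hy).symm ▸ rfl
    have hcd : d.count x = 0 := by
      rw [List.count_eq_zero]
      intro hmem
      exact absurd rfl (ne_of_gt (pv_run_gt_drop x t hsort x hmem))
    calc (x :: t).count x = (u ++ d).count x := by rw [hsplit]
      _ = u.count x + d.count x := List.count_append ..
      _ = u.length := by rw [hcu, hcd]; omega
  · intro k hk
    have hcu : u.count k = 0 := by
      rw [List.count_eq_zero]
      intro hmem
      exact hk (pv_run_mem_take x (x :: t) k hmem)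
    calc (x :: t).count k = (u ++ d).count k := by rw [hsplit]
      _ = u.count k + d.count k := List.count_append ..
      _ = d.count k := by rw [hcu]; omega

-- pvN across one run
theorem pv_run_N (x : Int) (t : List Int)
    (hsort : (x :: t).Pairwise (· ≤ ·)) :
    pvN (x :: t) = (if ((x :: t).takeWhile (fun z => z == x)).length = 2 then 1 else 0)
        + pvN ((x :: t).dropWhile (fun z => z == x)) := by
  have hxd : x ∉ (x :: t).dropWhile (fun z => z == x) :=
    fun hmem => absurd rfl (ne_of_gt (pv_run_gt_drop x t hsort x hmem))
  have hcounts := pv_run_count x t hsort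
  have hset : (x :: t).toFinset = insert x ((x :: t).dropWhile (fun z => z == x)).toFinset := by
    apply Finset.ext; intro a
    have hsplit := List.takeWhile_append_dropWhile (p := fun z => z == x) (l := x :: t)
    simp only [List.mem_toFinset, Finset.mem_insert]
    constructor
    · intro ha
      rw [← hsplit] at ha
      rcases List.mem_append.mp ha with h | h
      · exact Or.inl (pv_run_mem_take x (x :: t) a h)
      · exact Or.inr h
    · intro ha
      rcases ha with h | h
      · rw [h]; exact List.mem_cons_self
      · exact ((List.dropWhile_sublist _).mem h)
  have hxnot : x ∉ ((x :: t).dropWhile (fun z => z == x)).toFinset.filter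
      (fun k => (x :: t).count k = 2) := by
    intro h; exact hxd (List.mem_toFinset.mp (Finset.mem_filter.mp h).1)
  have hdfil : ((x :: t).dropWhile (fun z => z == x)).toFinset.filter
        (fun k => (x :: t).count k = 2)
      = ((x :: t).dropWhile (fun z => z == x)).toFinset.filter
        (fun k => ((x :: t).dropWhile (fun z => z == x)).count k = 2) := by
    apply Finset.filter_congr
    intro k hk
    rw [hcounts.2 k (fun h => hxd (Eq.mp
      (congrArg (· ∈ List.dropWhile (fun z => z == x) (x :: t)) h) (List.mem_toFinset.mp hk)))]
  unfold pvN
  rw [hset, Finset.filter_insert]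
  by_cases hc : (x :: t).count x = 2
  · rw [if_pos hc, Finset.card_insert_of_notMem (hdfil ▸ hxnot), hdfil,
      if_pos (by rw [← hcounts.1]; exact hc)]
    omega
  · rw [if_neg hc, hdfil, if_neg (by rw [← hcounts.1]; exact hc)]
    omega

-- the run scan computes (bp + pvN s, final counts) on any sorted list
theorem pv_scan (h0 h1 : Int) (s : List Int) (hsort : s.Pairwise (· ≤ ·))
    (bp c0 c1 : Int) :
    pvRunScan h0 h1 s (bp, c0, c1)
      = (bp + (pvN s : Int),
         if h0 ∈ s then (s.count h0 : Int) else c0,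
         if h1 ∈ s then (s.count h1 : Int) else c1) := by
  induction hn : s.length using Nat.strong_induction_on generalizing s bp c0 c1 with
  | _ n ih =>
    match s, hn with
    | [], _ => simp [pvRunScan, pvN]
    | x :: t, hn =>
      rw [pvRunScan]
      have hdlen : ((x :: t).dropWhile (fun z => z == x)).length < (x :: t).length := by
        rw [List.dropWhile_cons]
        simp only [beq_self_eq_true, if_pos]
        have := List.length_dropWhile_le (fun y => y == x) t
        simp only [List.length_cons]; omega
      have hdsort : ((x :: t).dropWhile (fun z => z == x)).Pairwise (· ≤ ·) :=
        List.Pairwise.sublist (List.dropWhile_sublist _) hsort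
      have hxd : x ∉ (x :: t).dropWhile (fun z => z == x) :=
        fun hmem => absurd rfl (ne_of_gt (pv_run_gt_drop x t hsort x hmem))
      obtain ⟨hc1, hc2⟩ := pv_run_count x t hsort
      rw [ih _ (hn ▸ hdlen) _ hdsort _ _ _ rfl]
      have hN := pv_run_N x t hsort
      have hbp : (if (((x :: t).takeWhile (fun y => y == x)).length : Int) = 2 then bp + 1 else bp)
            + (pvN ((x :: t).dropWhile (fun z => z == x)) : Int)
          = bp + (pvN (x :: t) : Int) := by
        rw [hN]
        by_cases hl : ((x :: t).takeWhile (fun y => y == x)).length = 2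
        · rw [if_pos (by exact_mod_cast hl), if_pos hl]; push_cast; ring
        · rw [if_neg (by exact_mod_cast hl), if_neg hl]; push_cast; ring
      have hcgen : ∀ (h' : Int) (c : Int),
          (if h' ∈ (x :: t).dropWhile (fun z => z == x)
              then (((x :: t).dropWhile (fun z => z == x)).count h' : Int)
              else if x = h' then (((x :: t).takeWhile (fun y => y == x)).length : Int) else c)
            = if h' ∈ x :: t then ((x :: t).count h' : Int) else c := by
        intro h' c
        by_cases hx : x = h'
        · subst hx
          rw [if_neg hxd, if_pos rfl, if_pos List.mem_cons_self]
          exact_mod_cast hc1.symm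
        · rw [if_neg hx]
          by_cases hmem : h' ∈ (x :: t).dropWhile (fun z => z == x)
          · have hmem2 : h' ∈ x :: t := (List.dropWhile_sublist _).mem hmem
            rw [if_pos hmem, if_pos hmem2, hc2 h' (fun h => hx h.symm)]
          · rw [if_neg hmem]
            by_cases hmem2 : h' ∈ x :: t
            · exfalso
              have hsplit := List.takeWhile_append_dropWhile (p := fun z => z == x) (l := x :: t)
              rw [← hsplit] at hmem2
              rcases List.mem_append.mp hmem2 with h | h
              · exact hx (pv_run_mem_take x (x :: t) h' h).symm
              · exact hmem h
            · rw [if_neg hmem2]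
      rw [hbp, hcgen h0 c0, hcgen h1 c1]

theorem pv_get01 (h0 h1 : Int) (t : List Int) :
    PySem.List.pyGet? (h0 :: h1 :: t) (0 : Int) = some h0 ∧
    PySem.List.pyGet? (h0 :: h1 :: t) (1 : Int) = some h1 := by
  constructor
  · simpa using PySem.List.pyGet?_natCast (h0 :: h1 :: t) 0 (by simp)
  · simpa using PySem.List.pyGet?_natCast (h0 :: h1 :: t) 1 (by simp)

theorem pv_main (hand_value : List Int) (board_value : List Int)
    (hpre : 2 ≤ hand_value.length) :
    check_if_2pairs hand_value board_value = check_if_2pairs_alt hand_value board_value := by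
  obtain ⟨h0, h1, t, rfl⟩ : ∃ h0 h1 t, hand_value = h0 :: h1 :: t := by
    match hand_value, hpre with
    | h0 :: h1 :: t, _ => exact ⟨h0, h1, t, rfl⟩
  unfold check_if_2pairs check_if_2pairs_alt
  rw [(pv_get01 h0 h1 t).1, (pv_get01 h0 h1 t).2]
  simp only [pv_b2p_length]
  set s := PySem.List.sorted board_value (fun x => x) false with hsdef
  have hperm : s.Perm board_value := PySem.List.sorted_perm board_value (fun x => x) false
  have hsort : s.Pairwise (· ≤ ·) := by
    have := PySem.List.sorted_pairwise (xs := board_value) (key := fun x => x)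
    simpa using this
  rw [pv_scan h0 h1 s hsort 0 0 0]
  have hNperm : pvN s = pvN board_value := by
    unfold pvN
    have htf : s.toFinset = board_value.toFinset := by
      apply Finset.ext; intro a; simp [List.mem_toFinset, hperm.mem_iff]
    have : ∀ k ∈ board_value.toFinset, (s.count k = 2) = (board_value.count k = 2) := by
      intro k _; rw [hperm.count_eq]
    rw [htf]
    congr 1
    apply Finset.filter_congr
    intro k hk
    rw [hperm.count_eq]
  have hc : ∀ h' : Int, (if h' ∈ s then (s.count h' : Int) else 0)
      = (board_value.count h' : Int) := by
    intro h'
    by_cases hm : h' ∈ s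
    · rw [if_pos hm, hperm.count_eq]
    · rw [if_neg hm, List.count_eq_zero.mpr (fun h => hm (hperm.mem_iff.mpr h))]
      simp
  simp only [hNperm, hc]
  set N : Nat := pvN board_value with hNdef
  have hcnt : ∀ v : Int, PySem.List.count board_value v = board_value.count v := fun _ => rfl
  simp only [hcnt]
  by_cases he : h0 = h1
  · rw [if_pos he, if_pos he]
    simp only [decide_eq_decide]
    omega
  · rw [if_neg he, if_neg he]
    split_ifs <;>
      (try simp only [eq_comm, decide_eq_true_eq, decide_eq_decide]) <;>
      first
        | rfl
        | omega
        | (rw [eq_comm, decide_eq_true_eq]; omega)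

-- ===== VERDICT (by name: the statement is the Claim_ definition above) =====
theorem check_if_2pairs_spec : Claim_equal_check_if_2pairs := by
  intro hand_value board_value _ hpre
  exact pv_main hand_value board_value hpre
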